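-- pv_equiv track=rewrite | github.com/ruipinto2025/mlflow-fastapi-docker | src/mlflow_fastapi_docker/train_deploy.py | decision_layer
-- ===== SOURCE A (Python) =====
-- from typing import Any, Optional, cast
--
-- ANOMALY_DETAILS_MAP: dict[str, dict[str, Any]] = {
--     "Motor Overcurrent": {
--         "severity_label": "Critical",
--         "action": "Stop immediately to prevent damage and collisions. Reduce operation intensity and analyze whether system configuration adjustments are needed",
--         "explanation": "Current spikes outside the normal range characterize a critical overload.",
--     },
--     "Motor Overheating": {
--         "severity_label": "Critical",
--         "action": "Activate the cooling protocol",
--         "explanation": "Temperature has exceeded the normal value, indicating overheating.",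
--     },
--     "Anomalous Motor Position": {
--         "severity_label": "Critical",
--         "action": "Stop immediately to prevent damage and collisions. Reduce operation intensity and analyze whether system configuration adjustments are needed",
--         "explanation": "The motor position is outside the normal range, possibly due to excessive speed.",
--     },
--     "High Speed Operation": {
--         "severity_label": "Critical",
--         "action": "Stop immediately to prevent damage and collisions. Reduce operation intensity and analyze whether system configuration adjustments are needed",
--         "explanation": "Speed exceeds the normal limit, suggesting a possible malfunction or control failure.",
--     },
--     "Abnormal Motor Torque": {
--         "severity_label": "Critical",
--         "action": "Stop immediately to prevent damage and collisions. Reduce operation intensity and analyze whether system configuration adjustments are needed",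
--         "explanation": "The force applied to the motor is outside the normal range.",
--     },
--     "High Vibration": {
--         "severity_label": "High",
--         "action": "Perform a mechanical inspection of the crane; check for wear and angular alignment",
--         "explanation": "Vibration angles deviate significantly from normal values, indicating high vibration.",
--     },
--     "Abnormal Power Variation": {
--         "severity_label": "Medium",
--         "action": "Stop immediately to prevent damage and collisions. Reduce operation intensity and analyze whether system configuration adjustments are needed",
--         "explanation": "Motor power is outside its normal values.",
--     },
-- }
--
-- def decision_layer(anomaly_labels: list[str]) -> list[dict[str, Any]]:
--     """
--     Prioritize anomalies based on the following order:
--       1. Motor Overcurrent (Critical)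
--       2. Motor Overheating (Critical)
--       3. Anomalous Motor Position (Critical)
--       4. High Speed Operation (Critical)
--       5. Abnormal Motor Torque (Critical)
--       6. High Vibration (High)
--       7. Abnormal Power Variation (Medium)
--
--     Returns a list with a single dictionary containing details for the highest priority anomaly.
--     """
--
--     priority_order = [
--         "Motor Overcurrent",
--         "Motor Overheating",
--         "Anomalous Motor Position",
--         "High Speed Operation",
--         "Abnormal Motor Torque",
--         "High Vibration",
--         "Abnormal Power Variation",
--     ]
--
--     for anomaly_type in priority_order:
--         matching = [label for label in anomaly_labels if anomaly_type in label]
--         if matching: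
--             info = ANOMALY_DETAILS_MAP[anomaly_type]
--             return [
--                 {
--                     "anomaly": matching[0],
--                     "severity": info["severity_label"],
--                     "action": info["action"],
--                     "explanation": info["explanation"],
--                 }
--             ]
--     return []
-- ===== SOURCE B (Python) =====
-- from typing import Any
--
-- _STOP = "Stop immediately to prevent damage and collisions. Reduce operation intensity and analyze whether system configuration adjustments are needed"
--
-- # One flat priority table: row index = priority rank, row = (type, severity, action, explanation)
-- ANOMALY_TABLE: list[tuple[str, str, str, str]] = [
--     ("Motor Overcurrent", "Critical", _STOP,
--      "Current spikes outside the normal range characterize a critical overload."),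
--     ("Motor Overheating", "Critical", "Activate the cooling protocol",
--      "Temperature has exceeded the normal value, indicating overheating."),
--     ("Anomalous Motor Position", "Critical", _STOP,
--      "The motor position is outside the normal range, possibly due to excessive speed."),
--     ("High Speed Operation", "Critical", _STOP,
--      "Speed exceeds the normal limit, suggesting a possible malfunction or control failure."),
--     ("Abnormal Motor Torque", "Critical", _STOP,
--      "The force applied to the motor is outside the normal range."),
--     ("High Vibration", "High",
--      "Perform a mechanical inspection of the crane; check for wear and angular alignment",
--      "Vibration angles deviate significantly from normal values, indicating high vibration."),
--     ("Abnormal Power Variation", "Medium", _STOP,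
--      "Motor power is outside its normal values."),
-- ]
--
--
-- def decision_layer(anomaly_labels: list[str]) -> list[dict[str, Any]]:
--     """Two stages: annotate each label with its priority rank (the first table row
--     whose type is a substring of it), then pick the minimum rank and the first
--     label achieving it, rendering the answer straight from that table row."""
--     ranked = []
--     for label in anomaly_labels:
--         for rank, row in enumerate(ANOMALY_TABLE):
--             if row[0] in label:
--                 ranked.append((rank, label))
--                 break
--     if not ranked:
--         return []
--     best = min(r for r, _ in ranked)
--     label = next(l for r, l in ranked if r == best)
--     _, severity, action, explanation = ANOMALY_TABLE[best]
--     return [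
--         {
--             "anomaly": label,
--             "severity": severity,
--             "action": action,
--             "explanation": explanation,
--         }
--     ]
-- ===== Notes on version B (the rewrite author's own statement) =====
-- stated objective: alternative
-- what changed: Replaces the priority-outer nested scan (one filter pass over all labels per priority type, dict lookup at the end) by a two-stage label-first pass over one flat priority table of (type, severity, action, explanation) rows: annotate each label with its rank (first table row whose type is a substring), then take the minimum rank and the first label achieving it and render straight from that table row.
import Mathlib
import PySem

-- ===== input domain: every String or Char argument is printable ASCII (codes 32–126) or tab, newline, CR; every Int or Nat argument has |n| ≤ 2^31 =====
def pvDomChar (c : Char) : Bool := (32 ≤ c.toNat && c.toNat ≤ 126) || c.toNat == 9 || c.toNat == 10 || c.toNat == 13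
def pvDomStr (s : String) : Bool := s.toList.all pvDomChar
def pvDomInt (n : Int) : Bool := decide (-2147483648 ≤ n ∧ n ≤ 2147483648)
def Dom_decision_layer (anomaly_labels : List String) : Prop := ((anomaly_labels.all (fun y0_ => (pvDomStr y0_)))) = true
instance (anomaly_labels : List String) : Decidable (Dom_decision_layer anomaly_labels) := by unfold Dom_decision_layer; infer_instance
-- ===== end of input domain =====

-- B replaces A's priority-outer nested scan by a two-stage pass: annotate every label with a
-- priority rank from one flat table, then take the minimum rank and the first label achieving it
-- (alternative decomposition and data layout; no speed claim).

-- ===== PORT A =====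
def aStop : String := "Stop immediately to prevent damage and collisions. Reduce operation intensity and analyze whether system configuration adjustments are needed"

def aPriorityOrder : List String :=
  ["Motor Overcurrent", "Motor Overheating", "Anomalous Motor Position",
   "High Speed Operation", "Abnormal Motor Torque", "High Vibration",
   "Abnormal Power Variation"]

def aDetailsMap : PySem.Dict String (PySem.Dict String String) :=
  PySem.Dict.ofList
    [("Motor Overcurrent", PySem.Dict.ofList
        [("severity_label", "Critical"), ("action", aStop),
         ("explanation", "Current spikes outside the normal range characterize a critical overload.")]),
     ("Motor Overheating", PySem.Dict.ofList
        [("severity_label", "Critical"), ("action", "Activate the cooling protocol"),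
         ("explanation", "Temperature has exceeded the normal value, indicating overheating.")]),
     ("Anomalous Motor Position", PySem.Dict.ofList
        [("severity_label", "Critical"), ("action", aStop),
         ("explanation", "The motor position is outside the normal range, possibly due to excessive speed.")]),
     ("High Speed Operation", PySem.Dict.ofList
        [("severity_label", "Critical"), ("action", aStop),
         ("explanation", "Speed exceeds the normal limit, suggesting a possible malfunction or control failure.")]),
     ("Abnormal Motor Torque", PySem.Dict.ofList
        [("severity_label", "Critical"), ("action", aStop),
         ("explanation", "The force applied to the motor is outside the normal range.")]),
     ("High Vibration", PySem.Dict.ofList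
        [("severity_label", "High"), ("action", "Perform a mechanical inspection of the crane; check for wear and angular alignment"),
         ("explanation", "Vibration angles deviate significantly from normal values, indicating high vibration.")]),
     ("Abnormal Power Variation", PySem.Dict.ofList
        [("severity_label", "Medium"), ("action", aStop),
         ("explanation", "Motor power is outside its normal values.")])]

-- A's returned single-dict list; ANOMALY_DETAILS_MAP[t]/info[...] never miss on the 7 types A
-- indexes with, so getD is exact here.
def aRender (label t : String) : List (List (String × String)) :=
  let info := aDetailsMap.getD t PySem.Dict.empty
  [[("anomaly", label), ("severity", info.getD "severity_label" ""),
    ("action", info.getD "action" ""), ("explanation", info.getD "explanation" "")]]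

-- 'for anomaly_type in priority_order: matching = [label for label in labels if anomaly_type in label]; if matching: return …'
def aLoop (anomaly_labels : List String) : List String → List (List (String × String))
  | [] => []
  | t :: rest =>
    match anomaly_labels.filter (fun label => PySem.Str.isIn t label) with
    | [] => aLoop anomaly_labels rest
    | m :: _ => aRender m t

def decision_layer (anomaly_labels : List String) : List (List (String × String)) :=
  aLoop anomaly_labels aPriorityOrder

-- ===== PORT B =====
def bStop : String := "Stop immediately to prevent damage and collisions. Reduce operation intensity and analyze whether system configuration adjustments are needed"

-- row = (type, severity, action, explanation); row index = priority rank
def bTable : List (String × String × String × String) :=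
  [("Motor Overcurrent", "Critical", bStop,
    "Current spikes outside the normal range characterize a critical overload."),
   ("Motor Overheating", "Critical", "Activate the cooling protocol",
    "Temperature has exceeded the normal value, indicating overheating."),
   ("Anomalous Motor Position", "Critical", bStop,
    "The motor position is outside the normal range, possibly due to excessive speed."),
   ("High Speed Operation", "Critical", bStop,
    "Speed exceeds the normal limit, suggesting a possible malfunction or control failure."),
   ("Abnormal Motor Torque", "Critical", bStop,
    "The force applied to the motor is outside the normal range."),
   ("High Vibration", "High",
    "Perform a mechanical inspection of the crane; check for wear and angular alignment",
    "Vibration angles deviate significantly from normal values, indicating high vibration."),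
   ("Abnormal Power Variation", "Medium", bStop,
    "Motor power is outside its normal values.")]

-- inner 'for rank, row in enumerate(ANOMALY_TABLE): if row[0] in label: … break'
def bLabelRank (label : String) (i : Nat) : List (String × String × String × String) → Option Nat
  | [] => none
  | row :: rest => if PySem.Str.isIn row.1 label then some i else bLabelRank label (i + 1) rest

def decision_layer_alt (anomaly_labels : List String) : List (List (String × String)) :=
  let ranked := anomaly_labels.filterMap
    (fun label => (bLabelRank label 0 bTable).map (fun r => (r, label)))
  match ranked with
  | [] => []
  | p :: ps =>
    let best := ps.foldl (fun m q => min m q.1) p.1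
    match (p :: ps).find? (fun q => q.1 == best) with
    | none => []   -- unreachable totality guard: 'best' is attained in 'ranked'
    | some (_, label) =>
      let row := bTable.getD best ("", "", "", "")
      [[("anomaly", label), ("severity", row.2.1),
        ("action", row.2.2.1), ("explanation", row.2.2.2)]]

-- ===== PRECONDITION & SPEC =====
def Spec_decision_layer (anomaly_labels : List String) (out : List (List (String × String))) : Prop := out = decision_layer_alt anomaly_labels
instance (anomaly_labels : List String) (out : List (List (String × String))) : Decidable (Spec_decision_layer anomaly_labels out) := by unfold Spec_decision_layer; infer_instance

-- ===== CLAIM (what is proved, stated in full; the proofs are below) =====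
def Claim_equal_decision_layer : Prop := ∀ (anomaly_labels : List String), Dom_decision_layer anomaly_labels → Spec_decision_layer anomaly_labels (decision_layer anomaly_labels)

-- ===== LEMMAS AND PROOFS =====

-- proof-side rank over a plain list of type strings
def rankFrom (label : String) (i : Nat) : List String → Option Nat
  | [] => none
  | t :: rest => if PySem.Str.isIn t label then some i else rankFrom label (i + 1) rest

-- left-biased minimum on (rank, label) pairs
def mergeB : Option (Nat × String) → Option (Nat × String) → Option (Nat × String)
  | none, b => b
  | a, none => a
  | some (ra, la), some (rb, lb) => if rb < ra then some (rb, lb) else some (ra, la)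

-- best (rank, label) over a label list, earliest label winning ties
def bestL (rank : String → Option Nat) : List String → Option (Nat × String)
  | [] => none
  | l :: L => mergeB ((rank l).map (fun r => (r, l))) (bestL rank L)

-- the same minimum over an already-ranked pair list
def bestP : List (Nat × String) → Option (Nat × String)
  | [] => none
  | p :: R => mergeB (some p) (bestP R)

-- proof-side view of A: the first priority type with a matching label, with that first label
def fM (anomaly_labels : List String) : List String → Option (String × String)
  | [] => none
  | t :: rest =>
    match anomaly_labels.filter (fun label => PySem.Str.isIn t label) with
    | [] => fM anomaly_labels rest
    | m :: _ => some (t, m)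

lemma rankFrom_ge (label : String) (ts : List String) :
    ∀ i r, rankFrom label i ts = some r → i ≤ r := by
  induction ts with
  | nil => intro i r h; simp [rankFrom] at h
  | cons t rest ih =>
    intro i r h
    simp only [rankFrom] at h
    split at h
    · cases h; omega
    · have := ih (i + 1) r h; omega

lemma bestL_ge (rank : String → Option Nat) (i : Nat)
    (h : ∀ l r, rank l = some r → i ≤ r) :
    ∀ L r m, bestL rank L = some (r, m) → i ≤ r := by
  intro L
  induction L with
  | nil => intro r m hb; simp [bestL] at hb
  | cons l L ih =>
    intro r m hb
    simp only [bestL] at hb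
    rcases hl : rank l with _ | rl <;> rcases hL : bestL rank L with _ | ⟨rL, mL⟩ <;>
      rw [hl, hL] at hb <;> simp only [Option.map_none, Option.map_some, mergeB] at hb
    · cases hb
    · cases hb; exact ih _ _ hL
    · cases hb; exact h _ _ hl
    · split at hb <;> cases hb
      · exact ih _ _ hL
      · exact h _ _ hl

lemma bestL_congr (r1 r2 : String → Option Nat) (L : List String)
    (h : ∀ l ∈ L, r1 l = r2 l) : bestL r1 L = bestL r2 L := by
  induction L with
  | nil => rfl
  | cons l L ih =>
    simp only [bestL, h l (by simp), ih (fun x hx => h x (by simp [hx]))]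

lemma bestL_none (L : List String) : bestL (fun _ => none) L = none := by
  induction L with
  | nil => rfl
  | cons l L ih => simp only [bestL, ih, Option.map_none, mergeB]

-- if m is the first label containing t, the best rank over t :: ts' from offset i is (i, m)
lemma bestL_first (t : String) (ts' : List String) (i : Nat) :
    ∀ (L : List String) m rest,
      L.filter (fun label => PySem.Str.isIn t label) = m :: rest →
      bestL (fun l => rankFrom l i (t :: ts')) L = some (i, m) := by
  intro L
  induction L with
  | nil => intro m rest h; simp at h
  | cons l L ih =>
    intro m rest h
    by_cases hl : PySem.Str.isIn t l = true
    · rw [List.filter_cons_of_pos hl] at h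
      cases h
      have hrank : rankFrom l i (t :: ts') = some i := by
        simp only [rankFrom]; rw [hl]; simp
      simp only [bestL]
      rw [hrank]
      rcases hL : bestL (fun l => rankFrom l i (t :: ts')) L with _ | ⟨rL, mL⟩
      · rfl
      · have hge : i ≤ rL :=
          bestL_ge _ i (fun l r hr => rankFrom_ge l (t :: ts') i r hr) L rL mL hL
        simp only [Option.map_some, mergeB]
        rw [if_neg (by omega)]
    · have hlf : PySem.Str.isIn t l = false := by simpa using hl
      rw [List.filter_cons_of_neg (by exact hl)] at h
      have hrec := ih m rest h
      have hrank : rankFrom l i (t :: ts') = rankFrom l (i + 1) ts' := by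
        simp only [rankFrom]; rw [hlf]; simp
      simp only [bestL]
      rw [hrank, hrec]
      rcases hr : rankFrom l (i + 1) ts' with _ | rl
      · rfl
      · have hge : i + 1 ≤ rl := rankFrom_ge l ts' (i + 1) rl hr
        simp only [Option.map_some, mergeB]
        rw [if_pos (by omega)]

-- the crux: the best (rank, label) over labels, ranks taken in ts from offset i, corresponds to A's scan of ts
lemma main_corr (ts : List String) :
    ∀ (i : Nat) (L : List String),
      (bestL (fun l => rankFrom l i ts) L = none ∧ fM L ts = none) ∨
      (∃ r m, bestL (fun l => rankFrom l i ts) L = some (r, m) ∧ i ≤ r ∧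
        fM L ts = some (ts.getD (r - i) "", m)) := by
  induction ts with
  | nil =>
    intro i L
    left
    exact ⟨(bestL_congr _ (fun _ => none) L (fun l _ => rfl)).trans (bestL_none L), rfl⟩
  | cons t ts' ih =>
    intro i L
    rcases hf : L.filter (fun label => PySem.Str.isIn t label) with _ | ⟨m, rest⟩
    · have hnone : ∀ l ∈ L, PySem.Str.isIn t l = false := by
        intro l hl
        by_contra hc
        have hmem : l ∈ L.filter (fun label => PySem.Str.isIn t label) :=
          List.mem_filter.mpr ⟨hl, by simpa using hc⟩
        rw [hf] at hmem
        exact absurd hmem (List.not_mem_nil)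
      have hcong : bestL (fun l => rankFrom l i (t :: ts')) L =
          bestL (fun l => rankFrom l (i + 1) ts') L := by
        apply bestL_congr
        intro l hl
        simp only [rankFrom]
        rw [hnone l hl]
        simp
      have hfM : fM L (t :: ts') = fM L ts' := by
        simp only [fM]; rw [hf]
      rcases ih (i + 1) L with ⟨h1, h2⟩ | ⟨r, m, h1, h2, h3⟩
      · left; exact ⟨by rw [hcong]; exact h1, by rw [hfM]; exact h2⟩
      · right
        refine ⟨r, m, by rw [hcong]; exact h1, by omega, ?_⟩
        rw [hfM, h3]
        have hgd : (t :: ts').getD (r - i) "" = ts'.getD (r - (i + 1)) "" := by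
          have hri : r - i = (r - (i + 1)) + 1 := by omega
          rw [hri]; rfl
        rw [hgd]
    · right
      refine ⟨i, m, bestL_first t ts' i L m rest hf, Nat.le_refl i, ?_⟩
      simp only [fM]
      rw [hf]
      simp

lemma aLoop_eq_fM (L : List String) (ts : List String) :
    aLoop L ts = match fM L ts with
      | none => []
      | some (t, m) => aRender m t := by
  induction ts with
  | nil => rfl
  | cons t ts' ih =>
    simp only [aLoop, fM]
    rcases hf : L.filter (fun label => PySem.Str.isIn t label) with _ | ⟨m, rest⟩
    · exact ih
    · rfl

-- B's rank over the table is the proof-side rank over the table's type column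
lemma bLabelRank_eq (l : String) :
    ∀ (ts : List (String × String × String × String)) (i : Nat),
      bLabelRank l i ts = rankFrom l i (ts.map Prod.fst) := by
  intro ts
  induction ts with
  | nil => intro i; rfl
  | cons row rest ih =>
    intro i
    simp only [bLabelRank, List.map_cons, rankFrom, ih]

-- bestL over labels = bestP over the ranked pair list B builds
lemma bestL_eq_bestP (rk : String → Option Nat) (L : List String) :
    bestL rk L = bestP (L.filterMap (fun l => (rk l).map (fun r => (r, l)))) := by
  induction L with
  | nil => rfl
  | cons l L ih =>
    rcases h : rk l with _ | r
    · simp only [bestL, h, Option.map_none, List.filterMap_cons, mergeB, ih]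
    · simp only [bestL, h, Option.map_some, List.filterMap_cons, bestP, ih]

lemma foldl_min_shift (qs : List (Nat × String)) :
    ∀ a b, qs.foldl (fun m q => min m q.1) (min a b) =
      min a (qs.foldl (fun m q => min m q.1) b) := by
  induction qs with
  | nil => intro a b; rfl
  | cons q qs ih =>
    intro a b
    simp only [List.foldl_cons]
    rw [min_assoc, ih]

-- the pair bestP picks is exactly (fold-min of the ranks, the first label achieving it)
lemma bestP_find :
    ∀ (ps : List (Nat × String)) (p : Nat × String),
      ∃ l, bestP (p :: ps) = some (ps.foldl (fun m q => min m q.1) p.1, l) ∧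
        (p :: ps).find? (fun q => q.1 == ps.foldl (fun m q => min m q.1) p.1) =
          some (ps.foldl (fun m q => min m q.1) p.1, l) := by
  intro ps
  induction ps with
  | nil =>
    intro p
    refine ⟨p.2, ?_, ?_⟩
    · simp [bestP, mergeB]
    · simp [List.find?]
  | cons q qs ih =>
    rintro ⟨p1, p2⟩
    obtain ⟨l', hb', hf'⟩ := ih q
    have hfold : (q :: qs).foldl (fun m q => min m q.1) p1 =
        min p1 (qs.foldl (fun m q => min m q.1) q.1) := by
      simp only [List.foldl_cons]
      exact foldl_min_shift qs p1 q.1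
    by_cases hlt : qs.foldl (fun m q => min m q.1) q.1 < p1
    · have hmin : min p1 (qs.foldl (fun m q => min m q.1) q.1) =
          qs.foldl (fun m q => min m q.1) q.1 := by omega
      refine ⟨l', ?_, ?_⟩
      · simp only [bestP] at hb' ⊢
        rw [hb']
        simp only [mergeB]
        rw [if_pos hlt, hfold, hmin]
      · rw [hfold, hmin]
        rw [List.find?_cons_of_neg, hf']
        simp only [beq_iff_eq]
        omega
    · have hmin : min p1 (qs.foldl (fun m q => min m q.1) q.1) = p1 := by omega
      refine ⟨p2, ?_, ?_⟩
      · simp only [bestP] at hb' ⊢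
        rw [hb']
        simp only [mergeB]
        rw [if_neg hlt, hfold, hmin]
      · rw [hfold, hmin]
        rw [List.find?_cons_of_pos]
        simp

lemma bLabelRank_lt (l : String) :
    ∀ (ts : List (String × String × String × String)) (i r : Nat),
      bLabelRank l i ts = some r → r < i + ts.length := by
  intro ts
  induction ts with
  | nil => intro i r h; simp [bLabelRank] at h
  | cons row rest ih =>
    intro i r h
    simp only [bLabelRank] at h
    split at h
    · cases h; simp only [List.length_cons]; omega
    · have := ih (i + 1) r h
      simp only [List.length_cons] at this ⊢
      omega

lemma bestP_cons_ne_none (p : Nat × String) (R : List (Nat × String)) :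
    bestP (p :: R) ≠ none := by
  simp only [bestP]
  rcases bestP R with _ | ⟨r, l⟩
  · simp [mergeB]
  · simp [mergeB]; split <;> simp

-- ===== VERDICT (by name: the statement is the Claim_ definition above) =====
theorem decision_layer_spec : Claim_equal_decision_layer := by
  intro L _
  unfold Spec_decision_layer decision_layer decision_layer_alt
  rw [aLoop_eq_fM]
  have hrk : ∀ l ∈ L, rankFrom l 0 aPriorityOrder = bLabelRank l 0 bTable := by
    intro l _
    rw [bLabelRank_eq]
    rfl
  have hbb : bestL (fun l => rankFrom l 0 aPriorityOrder) L =
      bestP (L.filterMap (fun l => (bLabelRank l 0 bTable).map (fun r => (r, l)))) := by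
    rw [bestL_congr _ (fun l => bLabelRank l 0 bTable) L hrk, bestL_eq_bestP]
  rcases main_corr aPriorityOrder 0 L with ⟨h1, h2⟩ | ⟨r, m, h1, _, h3⟩
  · rw [h2]
    rw [h1] at hbb
    rcases hR : L.filterMap (fun l => (bLabelRank l 0 bTable).map (fun r => (r, l))) with _ | ⟨p, ps⟩
    · simp
    · rw [hR] at hbb
      exact absurd hbb.symm (bestP_cons_ne_none p ps)
  · rw [h3]
    rw [h1] at hbb
    rcases hR : L.filterMap (fun l => (bLabelRank l 0 bTable).map (fun r => (r, l))) with _ | ⟨p, ps⟩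
    · rw [hR] at hbb; simp [bestP] at hbb
    · rw [hR] at hbb
      obtain ⟨l, hb, hf⟩ := bestP_find ps p
      rw [hb] at hbb
      -- now r = fold-min, m = l; r is the rank of a member of ranked, hence r < 7
      have hpair := Option.some.inj hbb
      have hr : r = ps.foldl (fun m q => min m q.1) p.1 := congrArg Prod.fst hpair
      have hm : m = l := congrArg Prod.snd hpair
      rw [← hr, ← hm] at hf
      have hmem : (r, m) ∈ p :: ps := List.mem_of_find?_eq_some hf
      rw [← hR] at hmem
      have hrlt : r < 7 := by
        obtain ⟨lab, -, hsome⟩ := List.mem_filterMap.mp hmem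
        rcases ho : bLabelRank lab 0 bTable with _ | r'
        · rw [ho] at hsome; simp at hsome
        · rw [ho] at hsome
          simp only [Option.map_some, Option.some_inj] at hsome
          have hr' : r' = r := congrArg Prod.fst hsome
          rw [hr'] at ho
          exact bLabelRank_lt lab bTable 0 r ho
      dsimp only
      rw [← hr, hf]
      dsimp only
      have hr0 : r - 0 = r := rfl
      rw [hr0]
      interval_cases r <;> rfl
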